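-- pv_equiv track=rewrite | github.com/dr1zaster/TCP-Hijacking- | hihijacking.py | pkt_to_json
-- ===== SOURCE A (Python) =====
-- def pkt_to_json(pkt): #take a single parameter , named pkt
--
--     json_packet = {} # EMPTY JSON ------ HERE I STORE THE FINAL JSON
--     xlayer = None # KEEPS TRACK OF THE CURRENT LAYER BEING PROCESSED
--     for line in pkt.split('\n'): # \n split it by using new line
--         if line.startswith("###["): # beggining of a new layer ------ when true stores in c layer
--             xlayer = line.replace("###[", '').replace("]###", '').strip().lower()
--         else:
--             keyval = line.split("=") # key value pair ----- stored in json
--             if len(keyval) == 2: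
--                 if xlayer not in json_packet:
--                     json_packet[xlayer] = {}
--                 json_packet[xlayer][keyval[0].strip()] = keyval[1].strip()
--     return json_packet
-- ===== SOURCE B (Python) =====
-- def pkt_to_json(pkt):
--     # Two-stage: group lines into per-layer blocks, then merge each block's
--     # key/value dict into the result (setdefault merges repeated headers).
--     blocks = []
--     name, body = None, []
--     for line in pkt.split('\n'):
--         if line.startswith("###["):
--             blocks.append((name, body))
--             name = line.replace("###[", "").replace("]###", "").strip().lower()
--             body = []
--         else:
--             body.append(line)
--     blocks.append((name, body))
--     result = {}
--     for name, body in blocks: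
--         kv = {}
--         for l in body:
--             parts = l.split("=")
--             if len(parts) == 2:
--                 kv[parts[0].strip()] = parts[1].strip()
--         if kv:
--             result.setdefault(name, {}).update(kv)
--     return result
-- ===== Notes on version B (the rewrite author's own statement) =====
-- stated objective: alternative
-- what changed: A is a single stateful pass that tracks the current layer and inserts each key/value into the result dict line by line; B is a two-stage decomposition that first groups the lines into per-layer blocks (flushing on each '###[' header) and then merges each block's locally-built key/value dict into the result with setdefault/update.
-- outside the precondition, e.g. on pkt_to_json('a = b'): A returns {None: {'a': 'b'}}, B returns {None: {'a': 'b'}}; on pkt_to_json('='): A returns {None: {'': ''}}, B returns {None: {'': ''}}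
import Mathlib
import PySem

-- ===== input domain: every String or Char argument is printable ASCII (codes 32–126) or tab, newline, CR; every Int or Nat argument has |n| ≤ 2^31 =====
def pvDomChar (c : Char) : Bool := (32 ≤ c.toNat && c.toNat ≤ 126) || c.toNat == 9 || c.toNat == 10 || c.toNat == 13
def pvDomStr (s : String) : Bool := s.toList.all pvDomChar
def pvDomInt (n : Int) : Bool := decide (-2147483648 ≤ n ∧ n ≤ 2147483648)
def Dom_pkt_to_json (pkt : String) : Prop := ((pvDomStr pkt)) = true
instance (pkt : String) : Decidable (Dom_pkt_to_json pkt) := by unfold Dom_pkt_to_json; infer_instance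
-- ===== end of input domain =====

-- B re-implements A by a two-stage decomposition (group lines into layer blocks, then merge
-- per-block key/value dicts); same result, no speed claim.

-- ===== PORT A =====
-- shared one-liner: both Pythons derive the layer name from a header line by the same expression
def pktHeaderName (line : String) : String :=
  PySem.Str.lower (PySem.Str.strip (PySem.Str.replace (PySem.Str.replace line "###[" "") "]###" ""))

-- A's loop body: state = (json_packet, xlayer)
def pktA_step (st : PySem.Dict String (PySem.Dict String String) × Option String) (line : String) :
    PySem.Dict String (PySem.Dict String String) × Option String :=
  if PySem.Str.startswith line "###[" then
    (st.1, some (pktHeaderName line))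
  else
    let keyval := (PySem.Str.split? line "=").getD []   -- sep "=" is non-empty: split? is never none
    if keyval.length == 2 then
      match st.2 with
      | some xlayer =>
          let d := if st.1.contains xlayer then st.1 else st.1.insert xlayer PySem.Dict.empty
          (d.modify xlayer PySem.Dict.empty
            (fun inner => inner.insert (PySem.Str.strip (PySem.List.pyGetD keyval 0 ""))
                                       (PySem.Str.strip (PySem.List.pyGetD keyval 1 ""))), st.2)
      | none => st   -- Python keys the dict by None here (not a String); Pre_ excludes these inputs
    else st

def pkt_to_json (pkt : String) : List (String × List (String × String)) :=
  ((((PySem.Str.split? pkt "\n").getD []).foldl pktA_step (PySem.Dict.empty, none)).1).items.map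
    (fun p => (p.1, p.2.items))

-- ===== PORT B =====
-- stage 1: group the lines into blocks (layer-name option, body lines), flushing on each header
def pktB_blocks : List String → Option String × List String → List (Option String × List String)
  | [], cur => [cur]
  | l :: rest, cur =>
      if PySem.Str.startswith l "###[" then
        cur :: pktB_blocks rest (some (pktHeaderName l), [])
      else
        pktB_blocks rest (cur.1, cur.2 ++ [l])

-- a block's key/value dict
def pktB_kv (body : List String) : PySem.Dict String String :=
  body.foldl (fun kv l =>
    let parts := (PySem.Str.split? l "=").getD []   -- sep "=" is non-empty: split? is never none
    if parts.length == 2 then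
      kv.insert (PySem.Str.strip (PySem.List.pyGetD parts 0 ""))
                (PySem.Str.strip (PySem.List.pyGetD parts 1 ""))
    else kv) PySem.Dict.empty

-- dict.update, ported by hand
def pktB_update (d kv : PySem.Dict String String) : PySem.Dict String String :=
  kv.items.foldl (fun d p => d.insert p.1 p.2) d

-- stage 2: merge one block into the result (result.setdefault(name, {}).update(kv))
def pktB_merge (res : PySem.Dict String (PySem.Dict String String))
    (b : Option String × List String) : PySem.Dict String (PySem.Dict String String) :=
  let kv := pktB_kv b.2
  if kv.items.isEmpty then res
  else
    match b.1 with
    | some n => (res.setdefault n PySem.Dict.empty).modify n PySem.Dict.empty (fun d => pktB_update d kv)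
    | none => res   -- Python keys the dict by None here (not a String); Pre_ excludes these inputs

def pkt_to_json_alt (pkt : String) : List (String × List (String × String)) :=
  (((pktB_blocks ((PySem.Str.split? pkt "\n").getD []) (none, [])).foldl pktB_merge
      PySem.Dict.empty).items).map (fun p => (p.1, p.2.items))

-- ===== PRECONDITION & SPEC =====
-- Pre_ excludes packets in which a line with exactly one '=' precedes the first '###[' header:
-- there Python A (and B) key the dict by None, which is not a value of the declared str-keyed type.
def Pre_pkt_to_json (pkt : String) : Prop :=
  ((((PySem.Str.split? pkt "\n").getD []).takeWhile
      (fun l => !(PySem.Str.startswith l "###["))).all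
    (fun l => ((PySem.Str.split? l "=").getD []).length != 2)) = true
instance (pkt : String) : Decidable (Pre_pkt_to_json pkt) := by unfold Pre_pkt_to_json; infer_instance

def pvWitness_pkt_to_json : String := "###[ IP ]###\n  src = 1.2.3.4\n  dst = 5.6.7.8"

def Spec_pkt_to_json (pkt : String) (out : List (String × List (String × String))) : Prop :=
  out = pkt_to_json_alt pkt
instance (pkt : String) (out : List (String × List (String × String))) : Decidable (Spec_pkt_to_json pkt out) := by
  unfold Spec_pkt_to_json; infer_instance

-- ===== CLAIM (what is proved, stated in full; the proofs are below) =====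
def Claim_equal_pkt_to_json : Prop :=
  ∀ (pkt : String), Dom_pkt_to_json pkt → Pre_pkt_to_json pkt → Spec_pkt_to_json pkt (pkt_to_json pkt)

-- ===== LEMMAS AND PROOFS =====

-- contains after insert
theorem pkt_contains_insert_self {κ ν : Type} [BEq κ] [LawfulBEq κ] (d : PySem.Dict κ ν) (k : κ) (v : ν) :
    (d.insert k v).contains k = true := by
  by_cases h : d.contains k = true
  · have h' : (d.items.any fun p => p.1 == k) = true := h
    rcases List.any_eq_true.mp h' with ⟨p, hp, hpk⟩
    simp only [PySem.Dict.insert, h, if_true]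
    show (List.any _ _) = true
    refine List.any_eq_true.mpr ⟨(k, v), List.mem_map.mpr ⟨p, hp, by simp [hpk]⟩, by simp⟩
  · simp only [PySem.Dict.insert, h]
    show (List.any _ _) = true
    exact List.any_eq_true.mpr ⟨(k, v), by simp⟩

theorem pkt_contains_insert_ne {κ ν : Type} [BEq κ] [LawfulBEq κ] (d : PySem.Dict κ ν) (a k : κ) (b : ν)
    (h : a ≠ k) : (d.insert a b).contains k = d.contains k := by
  by_cases hc : d.contains a = true
  · simp only [PySem.Dict.insert, if_pos hc]
    show (List.any _ _) = (List.any _ _)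
    rw [Bool.eq_iff_iff]
    simp only [List.any_eq_true, List.mem_map]
    constructor
    · rintro ⟨q, ⟨p, hp, rfl⟩, hqk⟩
      refine ⟨p, hp, ?_⟩
      by_cases h1 : (p.1 == a) = true
      · rw [if_pos h1] at hqk; simp only [beq_iff_eq] at hqk; exact absurd hqk h
      · rwa [if_neg h1] at hqk
    · rintro ⟨p, hp, hpk⟩
      refine ⟨_, ⟨p, hp, rfl⟩, ?_⟩
      have h1 : (p.1 == a) ≠ true := by
        intro hx
        exact h (by rw [← beq_iff_eq.mp hx, beq_iff_eq.mp hpk])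
      rw [if_neg h1]
      exact hpk
  · simp only [PySem.Dict.insert, if_neg hc]
    show (List.any _ _) = (List.any _ _)
    rw [List.any_append]
    have hab : ([(a, b)].any fun p => p.1 == k) = false := by simp [h]
    rw [hab, Bool.or_false]

-- nodup keys survive insert
theorem pkt_nodup_keys_insert {κ ν : Type} [BEq κ] [LawfulBEq κ] (d : PySem.Dict κ ν) (k : κ) (v : ν)
    (h : d.keys.Nodup) : (d.insert k v).keys.Nodup := by
  by_cases hc : d.contains k = true
  · have hk : (d.insert k v).keys = d.keys := by
      simp only [PySem.Dict.insert, if_pos hc, PySem.Dict.keys]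
      show List.map _ (List.map _ _) = _
      rw [List.map_map]
      apply List.map_congr_left
      intro p hp
      simp only [Function.comp]
      split_ifs with h1
      · simpa using (beq_iff_eq.mp h1).symm
      · rfl
    rw [hk]; exact h
  · have hkeys : (d.insert k v).keys = d.keys ++ [k] := by
      simp only [PySem.Dict.insert, if_neg hc, PySem.Dict.keys]
      show List.map _ (_ ++ _) = _
      rw [List.map_append]
      rfl
    rw [hkeys]
    have hnk : k ∉ d.keys := by
      intro hkm
      rcases List.mem_map.mp hkm with ⟨p, hp, hpk⟩
      exact hc (List.any_eq_true.mpr ⟨p, hp, by simp [hpk]⟩)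
    refine List.Nodup.append h (List.nodup_singleton k) ?_
    intro x hx hxk
    rw [List.mem_singleton] at hxk
    exact hnk (hxk ▸ hx)

theorem pkt_kv_nodup_keys (body : List String) : (pktB_kv body).keys.Nodup := by
  suffices h : ∀ (d : PySem.Dict String String), d.keys.Nodup →
      (body.foldl (fun kv l =>
        let parts := (PySem.Str.split? l "=").getD []
        if parts.length == 2 then
          kv.insert (PySem.Str.strip (PySem.List.pyGetD parts 0 ""))
                    (PySem.Str.strip (PySem.List.pyGetD parts 1 ""))
        else kv) d).keys.Nodup by
    exact h PySem.Dict.empty (by simp [PySem.Dict.empty, PySem.Dict.keys])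
  induction body with
  | nil => intro d hd; exact hd
  | cons l t ih =>
    intro d hd
    simp only [List.foldl_cons]
    split_ifs with h1
    · exact ih _ (pkt_nodup_keys_insert _ _ _ hd)
    · exact ih _ hd

-- two inserts at distinct keys commute as DICTS when the second key is already present
theorem pkt_insert_comm {κ ν : Type} [BEq κ] [LawfulBEq κ] (d : PySem.Dict κ ν) (a k : κ) (b v : ν)
    (hk : d.contains k = true) (hne : a ≠ k) :
    (d.insert a b).insert k v = (d.insert k v).insert a b := by
  have hk1 : (d.insert a b).contains k = true := by rw [pkt_contains_insert_ne d a k b hne]; exact hk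
  by_cases hca : d.contains a = true
  · have hca1 : (d.insert k v).contains a = true := by
      rw [pkt_contains_insert_ne d k a v (Ne.symm hne)]; exact hca
    apply PySem.Dict.ext
    simp only [PySem.Dict.insert, if_pos hca, if_pos hk]
    simp only [if_pos (show PySem.Dict.contains ⟨List.map (fun p => if (p.1 == a) = true then (a, b) else p) d.items⟩ k = true by
      simpa only [PySem.Dict.insert, if_pos hca] using hk1)]
    simp only [if_pos (show PySem.Dict.contains ⟨List.map (fun p => if (p.1 == k) = true then (k, v) else p) d.items⟩ a = true by
      simpa only [PySem.Dict.insert, if_pos hk] using hca1)]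
    show List.map _ (List.map _ _) = List.map _ (List.map _ _)
    rw [List.map_map, List.map_map]
    apply List.map_congr_left
    intro p hp
    simp only [Function.comp, beq_iff_eq]
    by_cases h1 : p.1 = a
    · have h2 : ¬ p.1 = k := fun hx => hne (by rw [← h1, hx])
      simp [h1, hne]
    · by_cases h2 : p.1 = k
      · have h3 : ¬ (k = a) := fun hx => hne hx.symm
        simp [h2, h3]
      · simp [h1, h2]
  · have hca1 : (d.insert k v).contains a = false := by
      rw [pkt_contains_insert_ne d k a v (Ne.symm hne)]
      exact Bool.not_eq_true _ ▸ (by simpa using hca)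
    apply PySem.Dict.ext
    simp only [PySem.Dict.insert, if_neg hca, if_pos hk]
    simp only [if_pos (show PySem.Dict.contains ⟨d.items ++ [(a, b)]⟩ k = true by
      simpa only [PySem.Dict.insert, if_neg hca] using hk1)]
    simp only [if_neg (show ¬ PySem.Dict.contains ⟨List.map (fun p => if (p.1 == k) = true then (k, v) else p) d.items⟩ a = true by
      simpa only [PySem.Dict.insert, if_pos hk, Bool.not_eq_true] using hca1)]
    show List.map _ (_ ++ _) = List.map _ _ ++ _
    rw [List.map_append]
    simp [hne]

-- a trailing insert at a present key moves inside a fold of inserts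
theorem pkt_fold_insert_out {κ ν : Type} [BEq κ] [LawfulBEq κ] (l : List (κ × ν)) (k : κ) :
    ∀ (e : PySem.Dict κ ν) (v : ν), (∀ p ∈ l, p.1 ≠ k) → e.contains k = true →
      (l.foldl (fun d p => d.insert p.1 p.2) e).insert k v
        = l.foldl (fun d p => d.insert p.1 p.2) (e.insert k v) := by
  induction l with
  | nil => intro e v _ _; rfl
  | cons p t ih =>
    intro e v hl hk
    simp only [List.foldl_cons]
    rw [ih (e.insert p.1 p.2) v (fun q hq => hl q (List.mem_cons_of_mem _ hq))
        (by rw [pkt_contains_insert_ne e p.1 k p.2 (hl p (List.mem_cons_self))]; exact hk)]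
    rw [pkt_insert_comm e p.1 k p.2 v hk (hl p (List.mem_cons_self))]

theorem pkt_exists_decomp {ν : Type} (k : String) (l : List (String × ν))
    (h : (l.any (fun p => p.1 == k)) = true) (hnd : (l.map (fun p => p.1)).Nodup) :
    ∃ pre v0 post, l = pre ++ (k, v0) :: post ∧ (∀ p ∈ pre, p.1 ≠ k) ∧ (∀ p ∈ post, p.1 ≠ k) := by
  induction l with
  | nil => simp at h
  | cons p t ih =>
    simp only [List.map_cons, List.nodup_cons] at hnd
    by_cases hpk : p.1 = k
    · refine ⟨[], p.2, t, ?_, by simp, ?_⟩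
      · simp [← hpk]
      · intro q hq hqk
        exact hnd.1 (hpk ▸ hqk ▸ List.mem_map.mpr ⟨q, hq, rfl⟩)
    · have h' : (t.any (fun p => p.1 == k)) = true := by
        simp only [List.any_cons, Bool.or_eq_true] at h
        rcases h with h | h
        · exact absurd (beq_iff_eq.mp h) hpk
        · exact h
      rcases ih h' hnd.2 with ⟨pre, v0, post, heq, hpre, hpost⟩
      exact ⟨p :: pre, v0, post, by rw [heq]; rfl,
        fun q hq => by rcases List.mem_cons.mp hq with rfl | hq; exact hpk; exact hpre q hq, hpost⟩

-- update distributes over a final insert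
theorem pkt_update_insert (kv : PySem.Dict String String) (hnd : kv.keys.Nodup)
    (d : PySem.Dict String String) (k v : String) :
    pktB_update d (kv.insert k v) = (pktB_update d kv).insert k v := by
  by_cases hc : kv.contains k = true
  · rcases pkt_exists_decomp k kv.items hc (hnd) with ⟨pre, v0, post, heq, hpre, hpost⟩
    have hmap : ∀ (l : List (String × String)), (∀ p ∈ l, p.1 ≠ k) →
        List.map (fun p => if (p.1 == k) = true then (k, v) else p) l = l := by
      intro l hlk
      calc List.map (fun p => if (p.1 == k) = true then (k, v) else p) l
          = List.map id l :=
            List.map_congr_left (fun p hp => by rw [if_neg (by simpa using hlk p hp)]; rfl)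
        _ = l := List.map_id _
    have hins : (kv.insert k v).items = pre ++ (k, v) :: post := by
      simp only [PySem.Dict.insert, if_pos hc]
      show List.map _ _ = _
      rw [heq, List.map_append, List.map_cons]
      rw [if_pos (by simp : (((k, v0) : String × String).1 == k) = true)]
      rw [hmap pre hpre, hmap post hpost]
    unfold pktB_update
    rw [hins, heq, List.foldl_append, List.foldl_append, List.foldl_cons, List.foldl_cons]
    dsimp only
    rw [pkt_fold_insert_out post k _ v hpost (pkt_contains_insert_self _ k v0),
        PySem.Dict.insert_insert_self]
  · have hins : (kv.insert k v).items = kv.items ++ [(k, v)] := by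
      simp only [PySem.Dict.insert, if_neg hc]
    unfold pktB_update
    rw [hins, List.foldl_append]
    rfl

theorem pkt_merge_none (res : PySem.Dict String (PySem.Dict String String)) (nb : List String) :
    pktB_merge res (none, nb) = res := by
  unfold pktB_merge
  dsimp only
  split <;> rfl

theorem pkt_merge_nil_body (res : PySem.Dict String (PySem.Dict String String)) (n : String) :
    pktB_merge res (some n, []) = res := by
  rfl

-- insert never leaves an empty dict
theorem pkt_insert_items_ne_nil {κ ν : Type} [BEq κ] (d : PySem.Dict κ ν) (k : κ) (v : ν) :
    (d.insert k v).items ≠ [] := by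
  by_cases hc : d.contains k = true
  · have : d.items ≠ [] := by
      intro h0
      rw [show d.contains k = d.items.any (fun p => p.1 == k) from rfl, h0] at hc
      simp at hc
    simp only [PySem.Dict.insert, if_pos hc]
    simpa using this
  · simp [PySem.Dict.insert, if_neg hc]

-- one non-header line extends the current block = one A-step from the merged state
theorem pkt_step_lemma (res : PySem.Dict String (PySem.Dict String String)) (xl : String)
    (body : List String) (l : String) (hl : PySem.Str.startswith l "###[" = false) :
    pktA_step (pktB_merge res (some xl, body), some xl) l
      = (pktB_merge res (some xl, body ++ [l]), some xl) := by
  have hkvapp : pktB_kv (body ++ [l]) =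
      (if (((PySem.Str.split? l "=").getD []).length == 2) = true then
        (pktB_kv body).insert
          (PySem.Str.strip (PySem.List.pyGetD ((PySem.Str.split? l "=").getD []) 0 ""))
          (PySem.Str.strip (PySem.List.pyGetD ((PySem.Str.split? l "=").getD []) 1 ""))
      else pktB_kv body) := by
    unfold pktB_kv
    rw [List.foldl_append]
    rfl
  unfold pktA_step
  rw [if_neg (by rw [hl]; simp)]
  dsimp only
  by_cases hp : (((PySem.Str.split? l "=").getD []).length == 2) = true
  · rw [if_pos hp]
    simp only [Prod.mk.injEq]
    refine ⟨?_, trivial⟩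
    -- abbreviations
    have hB : pktB_merge res (some xl, body ++ [l])
        = (res.setdefault xl PySem.Dict.empty).modify xl PySem.Dict.empty
            (fun d => pktB_update d ((pktB_kv body).insert
              (PySem.Str.strip (PySem.List.pyGetD ((PySem.Str.split? l "=").getD []) 0 ""))
              (PySem.Str.strip (PySem.List.pyGetD ((PySem.Str.split? l "=").getD []) 1 "")))) := by
      unfold pktB_merge
      dsimp only
      rw [hkvapp, if_pos hp]
      rw [if_neg (by
        simpa [List.isEmpty_iff] using pkt_insert_items_ne_nil (pktB_kv body)
          (PySem.Str.strip (PySem.List.pyGetD ((PySem.Str.split? l "=").getD []) 0 ""))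
          (PySem.Str.strip (PySem.List.pyGetD ((PySem.Str.split? l "=").getD []) 1 "")))]
    rw [hB]
    by_cases h0 : (pktB_kv body).items = []
    · have hkv0 : pktB_kv body = PySem.Dict.empty := PySem.Dict.ext h0
      have hM : pktB_merge res (some xl, body) = res := by
        unfold pktB_merge
        dsimp only
        rw [hkv0]
        rfl
      rw [hM, hkv0]
      by_cases hres : res.contains xl = true
      · rw [if_pos hres, PySem.Dict.setdefault_of_contains res PySem.Dict.empty hres]
        rfl
      · rw [if_neg hres,
          PySem.Dict.setdefault_of_not_contains res PySem.Dict.empty (by simpa using hres)]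
        rfl
    · have hM : pktB_merge res (some xl, body)
          = (res.setdefault xl PySem.Dict.empty).modify xl PySem.Dict.empty
              (fun d => pktB_update d (pktB_kv body)) := by
        unfold pktB_merge
        dsimp only
        rw [if_neg (by simpa [List.isEmpty_iff] using h0)]
      have hMc : (pktB_merge res (some xl, body)).contains xl = true := by
        rw [hM]
        simp only [PySem.Dict.modify]
        exact pkt_contains_insert_self _ _ _
      rw [if_pos hMc, hM]
      simp only [PySem.Dict.modify]
      rw [PySem.Dict.insert_insert_self, PySem.Dict.getD_insert]
      rw [if_pos rfl]
      rw [pkt_update_insert (pktB_kv body) (pkt_kv_nodup_keys body)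
        ((res.setdefault xl PySem.Dict.empty).getD xl PySem.Dict.empty) _ _]
  · rw [if_neg hp]
    have hBn : pktB_merge res (some xl, body ++ [l]) = pktB_merge res (some xl, body) := by
      unfold pktB_merge
      dsimp only
      rw [hkvapp, if_neg hp]
    rw [hBn]

-- main invariant: folding B's remaining blocks = running A's loop from the merged mid-state
theorem pkt_main (lines : List String) :
    ∀ (res : PySem.Dict String (PySem.Dict String String)) (xl : String) (body : List String),
      (pktB_blocks lines (some xl, body)).foldl pktB_merge res
        = (lines.foldl pktA_step (pktB_merge res (some xl, body), some xl)).1 := by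
  induction lines with
  | nil => intro res xl body; rfl
  | cons l t ih =>
    intro res xl body
    by_cases hl : PySem.Str.startswith l "###[" = true
    · rw [pktB_blocks, if_pos hl]
      rw [List.foldl_cons, List.foldl_cons]
      rw [show pktA_step (pktB_merge res (some xl, body), some xl) l
            = (pktB_merge res (some xl, body), some (pktHeaderName l)) by
          unfold pktA_step; rw [if_pos hl]]
      rw [ih (pktB_merge res (some xl, body)) (pktHeaderName l) []]
      rw [pkt_merge_nil_body]
    · rw [pktB_blocks, if_neg hl]
      rw [List.foldl_cons]
      rw [ih res xl (body ++ [l])]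
      rw [pkt_step_lemma res xl body l (by simpa using hl)]

-- before the first header (under Pre_) both sides ignore everything
theorem pkt_pre (lines : List String)
    (h : (lines.takeWhile (fun l => !(PySem.Str.startswith l "###["))).all
          (fun l => ((PySem.Str.split? l "=").getD []).length != 2) = true) :
    ∀ (res : PySem.Dict String (PySem.Dict String String)) (nb : List String),
      (pktB_blocks lines (none, nb)).foldl pktB_merge res
        = (lines.foldl pktA_step (res, none)).1 := by
  induction lines with
  | nil =>
    intro res nb
    rw [show pktB_blocks [] ((none : Option String), nb) = [(none, nb)] from rfl]
    rw [List.foldl_cons]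
    exact pkt_merge_none res nb
  | cons l t ih =>
    intro res nb
    by_cases hl : PySem.Str.startswith l "###[" = true
    · rw [pktB_blocks, if_pos hl]
      rw [List.foldl_cons, List.foldl_cons]
      rw [pkt_merge_none]
      rw [show pktA_step (res, none) l = (res, some (pktHeaderName l)) by
        unfold pktA_step; rw [if_pos hl]]
      rw [pkt_main t res (pktHeaderName l) []]
      rw [pkt_merge_nil_body]
    · rw [List.takeWhile_cons, if_pos (by simpa using hl), List.all_cons, Bool.and_eq_true] at h
      have hstep : pktA_step (res, none) l = (res, none) := by
        unfold pktA_step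
        rw [if_neg hl]
        dsimp only
        rw [if_neg (by simpa using h.1)]
      rw [pktB_blocks, if_neg hl, List.foldl_cons, hstep, ih h.2 res (nb ++ [l])]

-- ===== VERDICT (by name: the statement is the Claim_ definition above) =====
theorem pkt_to_json_spec : Claim_equal_pkt_to_json := by
  intro pkt _ hpre
  unfold Spec_pkt_to_json pkt_to_json pkt_to_json_alt
  rw [pkt_pre _ hpre]
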